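/- GENERATED by farm/mkstatement.py from design/units.tsv (unit `start_decoder.C8e`) and the assertions of Vorbis/Spec/StartDecoderC8.lean — do not edit.
   THE STATEMENT of the proof unit `start_decoder.C8e`: segment C8e of `start_decoder` (13 instructions; entries 0x114710;
   exits 0x114724,0x114b24; ranges 0x114710-0x11471e + 0x114af7-0x114b1f)
   takes each of its entry assertions to one of its exit assertions (`Vorbis.Spec.StartDecoder.SegC8e`), given the contracts of its callees.
   What the names mean: Vorbis/Spec/Basic.lean (the shared hypotheses), Vorbis/Spec/StartDecoderC8.lean (the assertions). The theorem to prove: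
   `theorem start_decoder_C8e_ok : Vorbis.Spec.start_decoder_C8e.Statement`. -/
import Vorbis.Spec.Alloc
import Vorbis.Spec.StartDecoderC8
namespace Vorbis.Spec.start_decoder_C8e
open X86 X86.User Asan

/-- The statement of unit `start_decoder.C8e`. -/
def Statement : Prop :=
  ∀ (Lay : Layout) (_hLay : Lay.hi = 0x1000000) (μ : Microarch) (_hμ : UserX.MicroOK μ) (u₀ : State)
    (_hcode : HasCodeNat Lay u₀ Vorbis.L.start_decoder.entry Vorbis.Code.code_start_decoder.nat Vorbis.L.start_decoder.size)
    (_h_asan_load4_noabort : Asan.SmallCheck Lay μ Vorbis.WayInv (Vorbis.CodeOK u₀) [.rax, .rcx, .rdx] 4 Vorbis.L.__asan_load4_noabort.entry)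
    (_h_asan_load1_noabort : Asan.SmallCheck Lay μ Vorbis.WayInv (Vorbis.CodeOK u₀) [.rax, .rdx] 1 Vorbis.L.__asan_load1_noabort.entry)
    (_h_setup_temp_free : ∀ (others : List Obj) (frames : List (Nat × FrameLayout)) (A : Arena) (m : Nat) (rest : List (Nat × Nat)), Calls Lay μ Vorbis.WayInv (Vorbis.conv u₀) Vorbis.L.setup_temp_free.entry (Vorbis.Spec.setup_temp_free.spec others frames A m rest)),
    Vorbis.Spec.StartDecoder.SegC8e Lay μ u₀

end Vorbis.Spec.start_decoder_C8e
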